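-- pv_equiv track=rewrite | github.com/xl666/recursosEstructuras24 | titulo/estudiantes/Grissel/cadenas/cadenas_02.py | contar_puntos
-- ===== SOURCE A (Python) =====
-- def contar_puntos(cadena):
--     contador = 0
--     caracter_siguiente = ''
--     for caracter in cadena:
--         if caracter == '.' and caracter_siguiente != '.':
--             contador += 1
--         caracter_siguiente = caracter
--     return contador
-- ===== SOURCE B (Python) =====
-- import re
--
-- def contar_puntos(cadena):
--     return len(re.findall(r'\.+', cadena))
-- ===== Notes on version B (the rewrite author's own statement) =====
-- stated objective: idiomatic
-- what changed: Replaced the character-by-character scan with a previous-character flag by a single regex pass counting maximal runs of consecutive dots (each run contributes exactly one dot not preceded by a dot).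
import Mathlib
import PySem

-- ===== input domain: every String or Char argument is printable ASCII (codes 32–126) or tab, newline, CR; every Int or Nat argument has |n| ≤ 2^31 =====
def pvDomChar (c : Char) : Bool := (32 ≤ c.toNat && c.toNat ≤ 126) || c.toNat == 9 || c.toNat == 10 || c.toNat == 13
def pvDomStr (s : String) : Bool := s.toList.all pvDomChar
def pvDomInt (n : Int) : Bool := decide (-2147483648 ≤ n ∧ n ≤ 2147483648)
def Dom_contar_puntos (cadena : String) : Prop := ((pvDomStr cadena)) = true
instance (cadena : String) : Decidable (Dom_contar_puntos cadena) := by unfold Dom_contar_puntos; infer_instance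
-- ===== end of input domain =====

-- B counts maximal runs of consecutive dots (one regex pass) instead of A's
-- per-character scan with a previous-character flag; same value everywhere.

-- ===== PORT A =====
-- A's loop: previous character starts as '' (here: none), becomes some c after each step.
def pvLoopA : List Char → Int → Option Char → Int
  | [], contador, _ => contador
  | c :: cs, contador, prev =>
      pvLoopA cs (if c = '.' ∧ prev ≠ some '.' then contador + 1 else contador) (some c)

def contar_puntos (cadena : String) : Int :=
  pvLoopA cadena.toList 0 none

-- ===== PORT B =====
-- re.findall(r'\.+', s): scan for the next dot, swallow the whole maximal run, count 1.
def pvRuns : List Char → Int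
  | [] => 0
  | c :: cs =>
      if c = '.' then 1 + pvRuns (cs.dropWhile (· = '.'))
      else pvRuns cs
  termination_by l => l.length
  decreasing_by
    · exact Nat.lt_succ_of_le (List.length_dropWhile_le _ _)
    · simp

def contar_puntos_alt (cadena : String) : Int :=
  pvRuns cadena.toList

-- ===== PRECONDITION & SPEC =====
def Spec_contar_puntos (cadena : String) (out : Int) : Prop := out = contar_puntos_alt cadena
instance (cadena : String) (out : Int) : Decidable (Spec_contar_puntos cadena out) := by unfold Spec_contar_puntos; infer_instance

-- ===== CLAIM (what is proved, stated in full; the proofs are below) =====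
def Claim_equal_contar_puntos : Prop := ∀ (cadena : String), Dom_contar_puntos cadena → Spec_contar_puntos cadena (contar_puntos cadena)

-- ===== LEMMAS AND PROOFS =====

lemma pvLoopA_eq_runs (cs : List Char) : ∀ (acc : Int) (prev : Option Char),
    pvLoopA cs acc prev =
      acc + (if prev = some '.' then pvRuns (cs.dropWhile (· = '.')) else pvRuns cs) := by
  induction cs with
  | nil => intro acc prev; simp [pvLoopA, pvRuns]
  | cons c cs ih =>
      intro acc prev
      by_cases hc : c = '.' <;> by_cases hp : prev = some '.' <;>
        simp [pvLoopA, pvRuns, hc, hp, ih, List.dropWhile] <;> ring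

-- ===== VERDICT (by name: the statement is the Claim_ definition above) =====
theorem contar_puntos_spec : Claim_equal_contar_puntos := by
  intro cadena _
  unfold Spec_contar_puntos contar_puntos contar_puntos_alt
  simp [pvLoopA_eq_runs]
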